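-- pv_equiv track=rewrite | github.com/padieul/tactic-annot | main.py | extract_theorem_signature
-- ===== SOURCE A (Python) =====
-- def extract_theorem_signature(theorem_text: str) -> str:
--     """
--     Extract just the theorem signature (everything before := or :=).
--
--     Args:
--         theorem_text: Full theorem text
--
--     Returns:
--         Just the signature part
--     """
--     lines = theorem_text.split('\n')
--     signature_lines = []
--
--     for line in lines:
--         if ':=' in line:
--             # Include the part before :=
--             before_assign = line.split(':=')[0]
--             signature_lines.append(before_assign)
--             break
--         else:
--             signature_lines.append(line)
--
--     return '\n'.join(signature_lines).strip()
-- ===== SOURCE B (Python) =====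
-- def extract_theorem_signature(theorem_text: str) -> str:
--     """Whole-string prefix before the first ':=' (whole text if absent), stripped."""
--     i = theorem_text.find(':=')
--     prefix = theorem_text if i == -1 else theorem_text[:i]
--     return prefix.strip()
-- ===== Notes on version B (the rewrite author's own statement) =====
-- stated objective: simpler
-- what changed: B replaces A's line-splitting loop with accumulator, per-line ':=' split, break and '\n'.join by a single whole-string find of the first ':=' followed by a prefix slice and strip.
import Mathlib
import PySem

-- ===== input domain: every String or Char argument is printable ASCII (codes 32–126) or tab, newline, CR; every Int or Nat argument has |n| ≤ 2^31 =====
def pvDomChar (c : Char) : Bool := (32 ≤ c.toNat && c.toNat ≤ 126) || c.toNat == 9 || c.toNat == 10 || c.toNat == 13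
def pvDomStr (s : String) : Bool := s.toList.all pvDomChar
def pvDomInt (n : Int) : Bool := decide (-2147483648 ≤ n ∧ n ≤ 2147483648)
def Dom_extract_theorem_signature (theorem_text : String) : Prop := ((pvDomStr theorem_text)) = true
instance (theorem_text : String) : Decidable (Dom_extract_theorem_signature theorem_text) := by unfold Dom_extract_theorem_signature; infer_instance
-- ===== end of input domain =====

-- B replaces A's line loop (split on '\n', accumulate lines, split the first ':='-line, break, join)
-- by one whole-string find of the first ':=' plus a prefix slice and strip; objective: simpler.

-- ===== PORT A =====
-- line.split(':=')[0]: the split list is always nonempty, so [0] is its head (headD's default is never used)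
def etsSplitHead (ln : List Char) : List Char :=
  (PySem.Chars.splitOn ln [':', '=']).headD []

-- the for-loop over lines with signature_lines accumulator and break
def etsLoop : List (List Char) → List (List Char)
  | [] => []
  | ln :: rest =>
      if PySem.Chars.isIn [':', '='] ln then [etsSplitHead ln]
      else ln :: etsLoop rest

def extract_theorem_signature (theorem_text : String) : String :=
  String.ofList (PySem.Chars.strip
    (PySem.Chars.join ['\n'] (etsLoop (PySem.Chars.splitOn theorem_text.toList ['\n']))))

-- ===== PORT B =====
def extract_theorem_signature_alt (theorem_text : String) : String :=
  let i := PySem.Str.find theorem_text ":="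
  PySem.Str.strip (if i = -1 then theorem_text else PySem.Str.slice theorem_text none (some i))

-- ===== PRECONDITION & SPEC =====
def Spec_extract_theorem_signature (theorem_text : String) (out : String) : Prop := out = extract_theorem_signature_alt theorem_text
instance (theorem_text : String) (out : String) : Decidable (Spec_extract_theorem_signature theorem_text out) := by unfold Spec_extract_theorem_signature; infer_instance

-- ===== CLAIM (what is proved, stated in full; the proofs are below) =====
def Claim_equal_extract_theorem_signature : Prop := ∀ (theorem_text : String), Dom_extract_theorem_signature theorem_text → Spec_extract_theorem_signature theorem_text (extract_theorem_signature theorem_text)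

-- ===== LEMMAS AND PROOFS =====

-- structural characterization of PySem.Chars.splitOn with a nonempty separator
def pvSplitF (s0 : Char) (st : List Char) : List Char → List (List Char)
  | [] => [[]]
  | c :: rest =>
      if (s0 :: st).isPrefixOf (c :: rest) then [] :: pvSplitF s0 st (rest.drop st.length)
      else (pvSplitF s0 st rest).modifyHead (c :: ·)
termination_by l => l.length
decreasing_by
  · simpa using Nat.lt_succ_of_le (List.length_drop_le st.length rest)
  · simp

theorem pvSplitF_ne_nil (s0 : Char) (st : List Char) : ∀ l, pvSplitF s0 st l ≠ [] := by
  intro l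
  induction l using pvSplitF.induct s0 st with
  | case1 => simp [pvSplitF]
  | case2 c rest hp ih => rw [pvSplitF]; simp [hp]
  | case3 c rest hp ih =>
      rw [pvSplitF]
      simp only [hp, Bool.false_eq_true, if_false]
      cases h : pvSplitF s0 st rest with
      | nil => exact absurd h ih
      | cons a b => simp

theorem pv_modifyHead_modifyHead {α : Type} (f g : α → α) (L : List α) :
    (L.modifyHead g).modifyHead f = L.modifyHead (f ∘ g) := by
  cases L <;> simp

theorem pvSplitOn_go_spec (s0 : Char) (st : List Char) :
    ∀ (fuel : Nat) (l cur : List Char) (acc : List (List Char)), l.length < fuel →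
      PySem.Chars.splitOn.go (s0 :: st) fuel l cur acc
        = acc.reverse ++ (pvSplitF s0 st l).modifyHead (cur.reverse ++ ·) := by
  intro fuel
  induction fuel with
  | zero => intro l cur acc h; omega
  | succ n ih =>
      intro l cur acc h
      cases l with
      | nil =>
          rw [PySem.Chars.splitOn.go.eq_def]
          simp [pvSplitF]
      | cons c rest =>
          rw [PySem.Chars.splitOn.go.eq_def]
          simp only []
          rw [pvSplitF]
          by_cases hp : (s0 :: st).isPrefixOf (c :: rest) = true
          · simp only [hp, if_true]
            rw [ih]
            · simp [List.append_assoc]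
              cases hF : pvSplitF s0 st (rest.drop st.length) <;> simp
            · simp at h ⊢
              omega
          · simp only [hp, Bool.false_eq_true, if_false]
            rw [ih]
            · rw [pv_modifyHead_modifyHead]
              have hf : (fun x => (c :: cur).reverse ++ x) = ((fun x => cur.reverse ++ x) ∘ fun x => c :: x) := by
                funext x; simp
              rw [hf]
            · simp at h ⊢; omega

theorem pvSplitOn_eq (s0 : Char) (st l : List Char) :
    PySem.Chars.splitOn l (s0 :: st) = pvSplitF s0 st l := by
  show PySem.Chars.splitOn.go (s0 :: st) (l.length + 1) l [] [] = _
  rw [pvSplitOn_go_spec s0 st (l.length + 1) l [] [] (Nat.lt_succ_self _)]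
  cases h : pvSplitF s0 st l with
  | nil => exact absurd h (pvSplitF_ne_nil s0 st l)
  | cons a b => simp

-- find.go facts
theorem pvFindGo_nil (sub : List Char) (k : Nat) :
    PySem.Chars.find.go sub [] k = if sub.isEmpty then (k : Int) else -1 := by
  rw [PySem.Chars.find.go.eq_def]

theorem pvFindGo_cons (sub : List Char) (c : Char) (rest : List Char) (k : Nat) :
    PySem.Chars.find.go sub (c :: rest) k
      = if sub.isPrefixOf (c :: rest) then (k : Int) else PySem.Chars.find.go sub rest (k + 1) := by
  rw [PySem.Chars.find.go.eq_def]

theorem pvFindGo_neg_or_ge (sub : List Char) :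
    ∀ (l : List Char) (k : Nat), PySem.Chars.find.go sub l k = -1 ∨ (k : Int) ≤ PySem.Chars.find.go sub l k := by
  intro l
  induction l with
  | nil => intro k; rw [pvFindGo_nil]; split <;> simp
  | cons c rest ih =>
      intro k
      rw [pvFindGo_cons]
      split
      · right; simp
      · rcases ih (k + 1) with h | h
        · left; exact h
        · right; omega

theorem pvFindGo_succ (sub : List Char) :
    ∀ (l : List Char) (k : Nat),
      PySem.Chars.find.go sub l (k + 1)
        = if PySem.Chars.find.go sub l k = -1 then -1 else PySem.Chars.find.go sub l k + 1 := by
  intro l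
  induction l with
  | nil =>
      intro k
      rw [pvFindGo_nil, pvFindGo_nil]
      split
      · have hk : ((k : Int)) ≠ -1 := by omega
        simp only [hk, if_false]
        push_cast
        omega
      · simp
  | cons c rest ih =>
      intro k
      rw [pvFindGo_cons, pvFindGo_cons]
      split
      · have : ((k : Int)) ≠ -1 := by omega
        simp [this]
      · exact ih (k + 1)

theorem pvFindGo_shift (sub : List Char) (l : List Char) (k : Nat) :
    PySem.Chars.find.go sub l k
      = if PySem.Chars.find.go sub l 0 = -1 then -1 else PySem.Chars.find.go sub l 0 + k := by
  induction k with
  | zero => split <;> simp_all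
  | succ n ih =>
      rw [pvFindGo_succ, ih]
      rcases pvFindGo_neg_or_ge sub l 0 with h | h
      · simp [h]
      · have : PySem.Chars.find.go sub l 0 ≠ -1 := by omega
        simp only [this, if_false]
        have : PySem.Chars.find.go sub l 0 + (n : Int) ≠ -1 := by omega
        simp only [this, if_false]
        push_cast
        omega

theorem pvFind_nil (sub : List Char) (h : sub ≠ []) : PySem.Chars.find [] sub = -1 := by
  show PySem.Chars.find.go sub [] 0 = -1
  rw [pvFindGo_nil]
  simp [List.isEmpty_iff, h]

theorem pvFind_prefix_zero (sub l : List Char) (h : sub.isPrefixOf l = true) :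
    PySem.Chars.find l sub = 0 := by
  cases l with
  | nil =>
      have : sub = [] := by
        simpa using List.isPrefixOf_iff_prefix.mp h
      subst this
      show PySem.Chars.find.go [] [] 0 = 0
      rw [pvFindGo_nil]
      simp
  | cons c rest =>
      show PySem.Chars.find.go sub (c :: rest) 0 = 0
      rw [pvFindGo_cons]
      simp [h]

theorem pvFind_rec (sub : List Char) (c : Char) (rest : List Char)
    (h : ¬ sub.isPrefixOf (c :: rest) = true) :
    PySem.Chars.find (c :: rest) sub
      = if PySem.Chars.find rest sub = -1 then -1 else PySem.Chars.find rest sub + 1 := by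
  show PySem.Chars.find.go sub (c :: rest) 0 = _
  rw [pvFindGo_cons]
  simp only [h, if_false, Bool.false_eq_true]
  rw [show (0 + 1 : Nat) = 1 from rfl, pvFindGo_shift sub rest 1]
  rfl

theorem pvFind_add_len_le (l sub : List Char) (h : PySem.Chars.find l sub ≠ -1) :
    (PySem.Chars.find l sub).toNat + sub.length ≤ l.length := by
  have h0 : 0 ≤ PySem.Chars.find l sub := by
    have := PySem.Chars.neg_one_le_find l sub
    omega
  obtain ⟨hpre, -⟩ := PySem.Chars.find_spec h0
  have h1 := List.IsPrefix.length_le hpre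
  have h2 := PySem.Chars.find_le_length l sub
  simp [List.length_drop] at h1
  omega

theorem pvFind_prefix_eq : ∀ (h l : List Char), h <+: l →
    PySem.Chars.find h [':', '='] ≠ -1 →
    PySem.Chars.find l [':', '='] = PySem.Chars.find h [':', '='] := by
  intro h
  induction h with
  | nil =>
      intro l _ hne
      exact absurd (pvFind_nil [':', '='] (by simp)) hne
  | cons c h' ih =>
      intro l hp hne
      obtain ⟨d, l', rfl, hceq, hpl⟩ : ∃ d l', l = d :: l' ∧ c = d ∧ h' <+: l' := by
        cases l with
        | nil => simpa using List.IsPrefix.length_le hp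
        | cons d l' =>
            obtain ⟨h1, h2⟩ := List.cons_prefix_cons.mp hp
            exact ⟨d, l', rfl, h1, h2⟩
      subst hceq
      by_cases hpre : ([':', '='] : List Char).isPrefixOf (c :: h') = true
      · have hpre' : ([':', '='] : List Char) <+: c :: h' := List.isPrefixOf_iff_prefix.mp hpre
        obtain ⟨hc, he⟩ := List.cons_prefix_cons.mp hpre'
        obtain ⟨e, h'', rfl⟩ : ∃ e h'', h' = e :: h'' := by
          cases h' with
          | nil => simpa using List.IsPrefix.length_le he
          | cons e h'' => exact ⟨e, h'', rfl⟩
        obtain ⟨he1, -⟩ := List.cons_prefix_cons.mp he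
        obtain ⟨f, l'', rfl, hf, -⟩ : ∃ f l'', l' = f :: l'' ∧ e = f ∧ h'' <+: l'' := by
          cases l' with
          | nil => simpa using List.IsPrefix.length_le hpl
          | cons f l'' =>
              obtain ⟨h1, h2⟩ := List.cons_prefix_cons.mp hpl
              exact ⟨f, l'', rfl, h1, h2⟩
        have hpre2 : ([':', '='] : List Char).isPrefixOf (c :: f :: l'') = true := by
          apply List.isPrefixOf_iff_prefix.mpr
          subst hc he1 hf
          exact List.cons_prefix_cons.mpr ⟨rfl, List.cons_prefix_cons.mpr ⟨rfl, List.nil_prefix⟩⟩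
        rw [pvFind_prefix_zero _ _ hpre, pvFind_prefix_zero _ _ hpre2]
      · -- first, h' cannot be empty
        obtain ⟨e, h'', rfl⟩ : ∃ e h'', h' = e :: h'' := by
          cases h' with
          | nil =>
              exfalso
              apply hne
              rw [pvFind_rec _ _ _ hpre, pvFind_nil [':', '='] (by simp)]
              simp
          | cons e h'' => exact ⟨e, h'', rfl⟩
        have hpre2 : ¬ ([':', '='] : List Char).isPrefixOf (c :: l') = true := by
          intro hcon
          apply hpre
          apply List.isPrefixOf_iff_prefix.mpr
          have hcon' := List.isPrefixOf_iff_prefix.mp hcon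
          obtain ⟨hc, he⟩ := List.cons_prefix_cons.mp hcon'
          obtain ⟨f, l'', rfl⟩ : ∃ f l'', l' = f :: l'' := by
            cases l' with
            | nil => simpa using List.IsPrefix.length_le he
            | cons f l'' => exact ⟨f, l'', rfl⟩
          obtain ⟨hf, -⟩ := List.cons_prefix_cons.mp he
          obtain ⟨he2, -⟩ := List.cons_prefix_cons.mp hpl
          subst hc hf he2
          exact List.cons_prefix_cons.mpr ⟨rfl, List.cons_prefix_cons.mpr ⟨rfl, List.nil_prefix⟩⟩
        have hne' : PySem.Chars.find (e :: h'') [':', '='] ≠ -1 := by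
          intro hcon
          apply hne
          rw [pvFind_rec _ _ _ hpre, hcon]
          simp
        rw [pvFind_rec _ _ _ hpre, pvFind_rec _ _ _ hpre2, ih l' hpl hne']

theorem pvHeadF (ln : List Char) :
    (pvSplitF ':' ['='] ln).headD []
      = if PySem.Chars.find ln [':', '='] = -1 then ln
        else ln.take (PySem.Chars.find ln [':', '=']).toNat := by
  induction ln using pvSplitF.induct ':' ['='] with
  | case1 =>
      rw [pvSplitF, pvFind_nil [':', '='] (by simp)]
      simp
  | case2 c rest hp ih =>
      rw [pvSplitF]
      simp only [hp, if_true]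
      rw [pvFind_prefix_zero _ _ hp]
      simp
  | case3 c rest hp ih =>
      rw [pvSplitF]
      simp only [hp, Bool.false_eq_true, if_false]
      obtain ⟨h, t, hF⟩ : ∃ h t, pvSplitF ':' ['='] rest = h :: t := by
        cases hF : pvSplitF ':' ['='] rest with
        | nil => exact absurd hF (pvSplitF_ne_nil _ _ _)
        | cons a b => exact ⟨a, b, rfl⟩
      rw [hF]
      rw [hF] at ih
      simp only [List.headD_cons, List.modifyHead_cons] at ih ⊢
      rw [pvFind_rec _ _ _ hp]
      by_cases hr : PySem.Chars.find rest [':', '='] = -1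
      · simp only [hr, if_true]
        simp [hr] at ih
        rw [ih]
      · have h0 : 0 ≤ PySem.Chars.find rest [':', '='] := by
          have := PySem.Chars.neg_one_le_find rest [':', '=']
          omega
        simp only [hr, if_false]
        have hne1 : PySem.Chars.find rest [':', '='] + 1 ≠ -1 := by omega
        simp only [hne1, if_false]
        simp only [hr, if_false] at ih
        rw [ih, show (PySem.Chars.find rest [':', '='] + 1).toNat
              = (PySem.Chars.find rest [':', '=']).toNat + 1 by omega]
        simp

theorem pvF_head_takeWhile (cs : List Char) :
    ∃ t2, pvSplitF '\n' [] cs = cs.takeWhile (· ≠ '\n') :: t2 := by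
  induction cs using pvSplitF.induct '\n' [] with
  | case1 => exact ⟨[], by rw [pvSplitF]; simp⟩
  | case2 c rest hp ih =>
      have hc : c = '\n' := by
        obtain ⟨h1, -⟩ := List.cons_prefix_cons.mp (List.isPrefixOf_iff_prefix.mp hp)
        exact h1.symm
      rw [pvSplitF]
      simp only [hp, if_true]
      subst hc
      exact ⟨pvSplitF '\n' [] (rest.drop ([] : List Char).length), by simp⟩
  | case3 c rest hp ih =>
      have hc : ¬ (c = '\n') := by
        intro hcon
        apply hp
        apply List.isPrefixOf_iff_prefix.mpr
        exact List.cons_prefix_cons.mpr ⟨hcon.symm, List.nil_prefix⟩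
      rw [pvSplitF]
      simp only [hp, Bool.false_eq_true, if_false]
      obtain ⟨t2, hF⟩ := ih
      rw [hF]
      refine ⟨t2, ?_⟩
      simp [hc]

theorem pvJoin_cons_head (c : Char) (x : List Char) (L : List (List Char)) :
    PySem.Chars.join ['\n'] ((c :: x) :: L) = c :: PySem.Chars.join ['\n'] (x :: L) := by
  cases L with
  | nil => simp [PySem.Chars.join_singleton]
  | cons y L' => rw [PySem.Chars.join_cons_cons, PySem.Chars.join_cons_cons]; simp

theorem pvLoop_ne_nil (x : List Char) (xs : List (List Char)) : etsLoop (x :: xs) ≠ [] := by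
  rw [etsLoop]; split <;> simp

theorem pvMain (cs : List Char) :
    PySem.Chars.join ['\n'] (etsLoop (pvSplitF '\n' [] cs))
      = if PySem.Chars.find cs [':', '='] = -1 then cs
        else cs.take (PySem.Chars.find cs [':', '=']).toNat := by
  induction cs using pvSplitF.induct '\n' [] with
  | case1 =>
      rw [pvSplitF, pvFind_nil [':', '='] (by simp)]
      simp [etsLoop, PySem.Chars.join_singleton,
        show PySem.Chars.isIn [':', '='] [] = false from by decide]
  | case2 c rest hp ih =>
      have hc : c = '\n' := by
        obtain ⟨h1, -⟩ := List.cons_prefix_cons.mp (List.isPrefixOf_iff_prefix.mp hp)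
        exact h1.symm
      subst hc
      rw [pvSplitF]
      simp only [hp, if_true, List.length_nil, List.drop_zero]
      have hloop : etsLoop ([] :: pvSplitF '\n' [] rest) = [] :: etsLoop (pvSplitF '\n' [] rest) := by
        rw [etsLoop]
        simp [show PySem.Chars.isIn [':', '='] [] = false from by decide]
      rw [hloop]
      simp only [List.length_nil, List.drop_zero] at ih
      cases hE : etsLoop (pvSplitF '\n' [] rest) with
      | nil =>
          exfalso
          obtain ⟨a, b, hF⟩ : ∃ a b, pvSplitF '\n' [] rest = a :: b := by
            cases hF : pvSplitF '\n' [] rest with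
            | nil => exact absurd hF (pvSplitF_ne_nil _ _ _)
            | cons a b => exact ⟨a, b, rfl⟩
          rw [hF] at hE
          exact pvLoop_ne_nil a b hE
      | cons y L =>
          rw [PySem.Chars.join_cons_cons]
          simp only [List.nil_append]
          rw [← hE, ih]
          have hnp : ¬ ([':', '='] : List Char).isPrefixOf ('\n' :: rest) = true := by
            intro hcon
            have h1 := (List.cons_prefix_cons.mp (List.isPrefixOf_iff_prefix.mp hcon)).1
            exact absurd h1 (by decide)
          rw [pvFind_rec _ _ _ hnp]
          by_cases hr : PySem.Chars.find rest [':', '='] = -1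
          · simp [hr]
          · have h0 : 0 ≤ PySem.Chars.find rest [':', '='] := by
              have := PySem.Chars.neg_one_le_find rest [':', '=']
              omega
            have hne1 : PySem.Chars.find rest [':', '='] + 1 ≠ -1 := by omega
            simp only [hr, hne1, if_false]
            rw [show (PySem.Chars.find rest [':', '='] + 1).toNat
                  = (PySem.Chars.find rest [':', '=']).toNat + 1 by omega]
            simp
  | case3 c rest hp ih =>
      have hc : ¬ (c = '\n') := by
        intro hcon
        apply hp
        apply List.isPrefixOf_iff_prefix.mpr
        exact List.cons_prefix_cons.mpr ⟨hcon.symm, List.nil_prefix⟩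
      rw [pvSplitF]
      simp only [hp, Bool.false_eq_true, if_false]
      obtain ⟨t2, hF⟩ := pvF_head_takeWhile rest
      rw [hF]
      simp only [List.modifyHead_cons]
      have hhp : rest.takeWhile (· ≠ '\n') <+: rest := List.takeWhile_prefix _
      by_cases hin : PySem.Chars.isIn [':', '='] (c :: rest.takeWhile (· ≠ '\n')) = true
      · have hloop : etsLoop ((c :: rest.takeWhile (· ≠ '\n')) :: t2)
            = [etsSplitHead (c :: rest.takeWhile (· ≠ '\n'))] := by
          rw [etsLoop, if_pos hin]
        rw [hloop, PySem.Chars.join_singleton]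
        have hfind : PySem.Chars.find (c :: rest.takeWhile (· ≠ '\n')) [':', '='] ≠ -1 :=
          (PySem.Chars.find_ne_neg_one_iff _ _).mpr
            ((PySem.Chars.isIn_iff_infix _ _).mp hin)
        rw [etsSplitHead, pvSplitOn_eq, pvHeadF]
        simp only [hfind, if_false]
        have hpre : (c :: rest.takeWhile (· ≠ '\n')) <+: (c :: rest) :=
          List.cons_prefix_cons.mpr ⟨rfl, hhp⟩
        rw [pvFind_prefix_eq _ _ hpre hfind]
        simp only [hfind, if_false]
        obtain ⟨tail, htail⟩ := hpre
        have hlen : (PySem.Chars.find (c :: rest.takeWhile (· ≠ '\n')) [':', '=']).toNat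
            ≤ (c :: rest.takeWhile (· ≠ '\n')).length := by
          have := pvFind_add_len_le (c :: rest.takeWhile (· ≠ '\n')) [':', '='] hfind
          simp at this ⊢
          omega
        rw [← htail, List.take_append_of_le_length hlen]
      · have hinh : ¬ PySem.Chars.isIn [':', '='] (rest.takeWhile (· ≠ '\n')) = true := by
          intro hcon
          apply hin
          apply (PySem.Chars.isIn_iff_infix _ _).mpr
          exact List.infix_cons_iff.mpr (Or.inr ((PySem.Chars.isIn_iff_infix _ _).mp hcon))
        have hloop : etsLoop ((c :: rest.takeWhile (· ≠ '\n')) :: t2)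
            = (c :: rest.takeWhile (· ≠ '\n')) :: etsLoop t2 := by
          rw [etsLoop, if_neg hin]
        rw [hloop, pvJoin_cons_head]
        have hloop2 : etsLoop (rest.takeWhile (· ≠ '\n') :: t2)
            = rest.takeWhile (· ≠ '\n') :: etsLoop t2 := by
          rw [etsLoop, if_neg hinh]
        rw [← hloop2, ← hF, ih]
        have hnp : ¬ ([':', '='] : List Char).isPrefixOf (c :: rest) = true := by
          intro hcon
          obtain ⟨hc1, he⟩ := List.cons_prefix_cons.mp (List.isPrefixOf_iff_prefix.mp hcon)
          obtain ⟨f, r', rfl⟩ : ∃ f r', rest = f :: r' := by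
            cases rest with
            | nil => simpa using List.IsPrefix.length_le he
            | cons f r' => exact ⟨f, r', rfl⟩
          obtain ⟨hf, -⟩ := List.cons_prefix_cons.mp he
          apply hin
          apply (PySem.Chars.isIn_iff_infix _ _).mpr
          apply List.IsPrefix.isInfix
          have hfne : ¬ (f = '\n') := by
            subst hf
            decide
          have hTW : (f :: r').takeWhile (· ≠ '\n') = f :: r'.takeWhile (· ≠ '\n') := by
            simp [hfne]

          rw [hTW]
          exact List.cons_prefix_cons.mpr ⟨hc1, List.cons_prefix_cons.mpr ⟨hf, List.nil_prefix⟩⟩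
        rw [pvFind_rec _ _ _ hnp]
        by_cases hr : PySem.Chars.find rest [':', '='] = -1
        · simp [hr]
        · have h0 : 0 ≤ PySem.Chars.find rest [':', '='] := by
            have := PySem.Chars.neg_one_le_find rest [':', '=']
            omega
          have hne1 : PySem.Chars.find rest [':', '='] + 1 ≠ -1 := by omega
          simp only [hr, hne1, if_false]
          rw [show (PySem.Chars.find rest [':', '='] + 1).toNat
                = (PySem.Chars.find rest [':', '=']).toNat + 1 by omega]
          simp

-- ===== VERDICT (by name: the statement is the Claim_ definition above) =====
theorem extract_theorem_signature_spec : Claim_equal_extract_theorem_signature := by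
  intro t _
  unfold Spec_extract_theorem_signature extract_theorem_signature extract_theorem_signature_alt
  have hfind : PySem.Str.find t ":=" = PySem.Chars.find t.toList [':', '='] := rfl
  rw [pvSplitOn_eq '\n' [] t.toList, pvMain]
  by_cases hr : PySem.Chars.find t.toList [':', '='] = -1
  · simp only [hr, if_true]
    show String.ofList (PySem.Chars.strip t.toList)
      = PySem.Str.strip (if PySem.Str.find t ":=" = -1 then t else _)
    rw [hfind, if_pos hr]
    rfl
  · have h0 : 0 ≤ PySem.Chars.find t.toList [':', '='] := by
      have := PySem.Chars.neg_one_le_find t.toList [':', '=']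
      omega
    simp only [hr, if_false]
    show String.ofList (PySem.Chars.strip (t.toList.take (PySem.Chars.find t.toList [':', '=']).toNat))
      = PySem.Str.strip (if PySem.Str.find t ":=" = -1 then t
          else PySem.Str.slice t none (some (PySem.Str.find t ":=")))
    rw [hfind, if_neg hr]
    have hsl : (PySem.Str.slice t none (some (PySem.Chars.find t.toList [':', '=']))).toList
        = t.toList.take (PySem.Chars.find t.toList [':', '=']).toNat := by
      rw [PySem.Str.toList_slice, PySem.Chars.slice_eq_listSlice, PySem.List.slice_to _ h0]
    show String.ofList (PySem.Chars.strip (t.toList.take (PySem.Chars.find t.toList [':', '=']).toNat))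
      = String.ofList (PySem.Chars.strip (PySem.Str.slice t none (some (PySem.Chars.find t.toList [':', '=']))).toList)
    rw [hsl]
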